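-- pv_equiv track=rewrite | github.com/allenkang92/my-coding-challenges | python/pg/pg_181896.py | solution
-- ===== SOURCE A (Python) =====
-- def solution(num_list):
--     answer = 0
--     for i in num_list:
--         if i < 0:
--             answer = num_list.index(i)  # 주의: index()는 첫 번째 등장 위치만 반환
--             break
--         for j in range(-10, 100+1):     # 불필요한 이중 루프 - 제거 가능
--             if j not in num_list:
--                 answer = -1
--     return answer
-- ===== SOURCE B (Python) =====
-- def solution(num_list):
--     for idx, v in enumerate(num_list):
--         if v < 0:
--             return idx
--     return -1 if num_list else 0
-- ===== Notes on version B (the rewrite author's own statement) =====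
-- stated objective: simpler
-- what changed: Single linear scan with enumerate returning the first negative's index, replacing A's nested range(-10,101) membership loop and the redundant list.index call; the no-negative result is the ternary -1/0.
import Mathlib
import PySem

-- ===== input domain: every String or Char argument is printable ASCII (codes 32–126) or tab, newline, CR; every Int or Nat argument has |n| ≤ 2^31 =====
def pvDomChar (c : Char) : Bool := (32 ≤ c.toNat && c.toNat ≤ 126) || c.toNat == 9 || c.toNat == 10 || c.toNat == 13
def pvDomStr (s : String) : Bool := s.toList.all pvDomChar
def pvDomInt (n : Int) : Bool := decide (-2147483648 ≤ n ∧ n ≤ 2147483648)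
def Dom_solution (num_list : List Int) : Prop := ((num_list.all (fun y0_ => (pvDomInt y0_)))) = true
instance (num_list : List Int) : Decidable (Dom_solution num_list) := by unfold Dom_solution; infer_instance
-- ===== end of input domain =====

-- B replaces A's nested range(-10,101) membership loop by one linear scan (objective: simpler).

-- ===== PORT A =====
-- loop over the elements of num_list carrying `answer`; `break` = returning immediately.
def solutionLoop (num_list : List Int) : List Int → Int → Int
  | [], answer => answer
  | i :: rest, answer =>
    if i < 0 then
      -- num_list.index(i): exact here since i ∈ num_list, so index? is some
      match PySem.List.index? num_list i with
      | some k => (k : Int)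
      | none => 0
    else
      solutionLoop num_list rest
        ((PySem.List.pyRange (-10) 101 1).foldl
          (fun a j => if j ∈ num_list then a else -1) answer)

def solution (num_list : List Int) : Int := solutionLoop num_list num_list 0

-- ===== PORT B =====
-- `for idx, v in enumerate(num_list): if v < 0: return idx`
def solutionAltFind : List Int → Int → Option Int
  | [], _ => none
  | v :: rest, idx => if v < 0 then some idx else solutionAltFind rest (idx + 1)

def solution_alt (num_list : List Int) : Int :=
  match solutionAltFind num_list 0 with
  | some i => i
  | none => if num_list.isEmpty then 0 else -1

-- ===== PRECONDITION & SPEC =====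
def Spec_solution (num_list : List Int) (out : Int) : Prop := out = solution_alt num_list
instance (num_list : List Int) (out : Int) : Decidable (Spec_solution num_list out) := by unfold Spec_solution; infer_instance

-- ===== CLAIM (what is proved, stated in full; the proofs are below) =====
def Claim_equal_solution : Prop := ∀ (num_list : List Int), Dom_solution num_list → Spec_solution num_list (solution num_list)

-- ===== LEMMAS AND PROOFS =====

-- once the inner fold's accumulator is -1 it stays -1
theorem innerFold_keep_neg (num_list : List Int) (l : List Int) :
    l.foldl (fun a j => if j ∈ num_list then a else -1) (-1) = -1 := by
  induction l with
  | nil => rfl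
  | cons x t ih => simp only [List.foldl_cons]; split <;> exact ih

-- if -10 ∉ num_list, the inner fold returns -1 whatever the starting accumulator
theorem innerFold_eq_neg (num_list : List Int) (h : (-10 : Int) ∉ num_list) (answer : Int) :
    (PySem.List.pyRange (-10) 101 1).foldl (fun a j => if j ∈ num_list then a else -1) answer = -1 := by
  rw [PySem.List.pyRange_one_cons (by norm_num)]
  simp only [List.foldl_cons, if_neg h]
  exact innerFold_keep_neg num_list _

-- if the scan finds no negative, the list is all nonnegative
theorem altFind_none_nonneg (t : List Int) : ∀ (k : Int),
    solutionAltFind t k = none → ∀ x ∈ t, 0 ≤ x := by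
  induction t with
  | nil => simp
  | cons y s ih =>
    intro k hf x hx
    simp only [solutionAltFind] at hf
    by_cases hy : y < 0
    · simp [hy] at hf
    · rw [if_neg hy] at hf
      rcases List.mem_cons.mp hx with rfl | hx
      · omega
      · exact ih _ hf x hx

theorem key (rest pre : List Int) (hpre : ∀ x ∈ pre, 0 ≤ x) (answer : Int) :
    solutionLoop (pre ++ rest) rest answer =
      (match solutionAltFind rest (pre.length : Int) with
       | some i => i
       | none => if rest.isEmpty then answer else -1) := by
  induction rest generalizing pre answer with
  | nil => simp [solutionLoop, solutionAltFind]
  | cons i t ih =>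
    have hlist : pre ++ i :: t = (pre ++ [i]) ++ t := by simp
    by_cases hi : i < 0
    · -- break with num_list.index(i); i ∉ pre since pre is nonnegative
      have hnp : i ∉ pre := fun hm => absurd (hpre i hm) (by omega)
      have hidx : PySem.List.index? (pre ++ i :: t) i = some pre.length := by
        rw [hlist, PySem.List.index?_append_of_mem _ (by simp),
            PySem.List.index?_append_singleton_self _ _ hnp]
      simp only [solutionLoop, solutionAltFind, hidx]
      simp [hi]
    · have hpre' : ∀ x ∈ pre ++ [i], 0 ≤ x := by
        intro x hx
        rcases List.mem_append.mp hx with h | h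
        · exact hpre x h
        · simp at h; omega
      simp only [solutionLoop, if_neg hi]
      rw [hlist, ih (pre ++ [i]) hpre']
      have hL : (((pre ++ [i]).length : Int)) = (pre.length : Int) + 1 := by simp
      rw [hL]
      conv_rhs => rw [solutionAltFind, if_neg hi]
      cases hf : solutionAltFind t ((pre.length : Int) + 1) with
      | some k => rfl
      | none =>
        have ht := altFind_none_nonneg t _ hf
        have hno : (-10 : Int) ∉ (pre ++ [i]) ++ t := by
          intro hm
          rcases List.mem_append.mp hm with h | h
          · have := hpre' _ h; omega
          · have := ht _ h; omega
        have hfold := innerFold_eq_neg _ hno answer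
        simp only [List.isEmpty_cons, if_neg (by simp : ¬(false = true))]
        split
        · exact hfold
        · rfl

-- ===== VERDICT (by name: the statement is the Claim_ definition above) =====
theorem solution_spec : Claim_equal_solution := by
  intro num_list _
  unfold Spec_solution solution solution_alt
  have h := key num_list [] (by simp) 0
  simp only [List.nil_append, List.length_nil, Int.natCast_zero] at h
  rw [h]
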